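-- pv_equiv track=rewrite | github.com/KardelRuveyda/uretken-yapayzeka-chatbot-gelistirme-temelleri | homeworks/ytu/Bekir_Samet_Arslan/sifre_kirici.py | sifrele
-- ===== SOURCE A (Python) =====
-- def sifrele(normal_mesaj):
--     sifreli_mesaj = ""
--     sayi_dizisi = ""
--     sayi_mod = False
--
--     for harf in normal_mesaj:
--         if harf.isdigit():
--             sayi_dizisi += harf
--             sayi_mod = True
--         else:
--             if sayi_mod:
--                 sifreli_mesaj += sayi_dizisi[::-1]
--                 sayi_dizisi = ""
--                 sayi_mod = False
--
--             if harf.isalpha():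
--                 harf_sirasi = ord(harf)
--                 yeni_harf = chr(harf_sirasi + 5)
--
--                 if yeni_harf > 'z':
--                     yeni_harf = chr(ord(yeni_harf) - 26)
--
--                 sifreli_mesaj += yeni_harf
--             else:
--                 sifreli_mesaj += harf
--
--     if sayi_mod:
--         sifreli_mesaj += sayi_dizisi[::-1]
--
--     return sifreli_mesaj
-- ===== SOURCE B (Python) =====
-- def sifrele(normal_mesaj):
--     def kaydir(c):
--         if c.isalpha():
--             y = chr(ord(c) + 5)
--             if y > 'z':
--                 y = chr(ord(y) - 26)
--             return y
--         return c
--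
--     parcalar = []
--     n = len(normal_mesaj)
--     i = 0
--     while i < n:
--         if normal_mesaj[i].isdigit():
--             j = i
--             while j < n and normal_mesaj[j].isdigit():
--                 j += 1
--             parcalar.append(normal_mesaj[i:j][::-1])
--             i = j
--         else:
--             parcalar.append(kaydir(normal_mesaj[i]))
--             i += 1
--     return ''.join(parcalar)
-- ===== Notes on version B (the rewrite author's own statement) =====
-- stated objective: alternative
-- what changed: Replaces A's single stateful loop with a digit buffer and sayi_mod flag by run-based scanning: maximal digit runs are located with an inner index scan, sliced out and reversed, and non-digit characters are mapped through a separate shift helper; pieces are joined at the end.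
import Mathlib
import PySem

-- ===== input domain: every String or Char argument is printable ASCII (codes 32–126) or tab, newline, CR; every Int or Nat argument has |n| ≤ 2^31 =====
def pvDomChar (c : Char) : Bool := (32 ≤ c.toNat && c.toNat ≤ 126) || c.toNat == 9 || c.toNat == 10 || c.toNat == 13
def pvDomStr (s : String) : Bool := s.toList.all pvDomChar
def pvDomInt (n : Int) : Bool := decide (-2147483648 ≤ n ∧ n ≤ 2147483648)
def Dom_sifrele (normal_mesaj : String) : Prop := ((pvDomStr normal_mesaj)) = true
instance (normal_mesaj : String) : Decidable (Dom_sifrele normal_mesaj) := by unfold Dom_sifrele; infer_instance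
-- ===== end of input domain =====

-- B replaces A's single stateful loop (digit-buffer + sayi_mod flag) by run-grouping:
-- scan maximal digit runs and reverse them, shift other characters with a helper (objective: alternative decomposition).

-- ===== PORT A =====
-- one loop iteration of A: state is (sifreli_mesaj, sayi_dizisi, sayi_mod); sayi_dizisi[::-1] is ported as List.reverse (exact: full slice with step -1)
def sifreleStep (st : List Char × List Char × Bool) (harf : Char) : List Char × List Char × Bool :=
  if PySem.Chars.isdigit harf then (st.1, st.2.1 ++ [harf], true)
  else
    let st' := if st.2.2 then (st.1 ++ st.2.1.reverse, ([] : List Char), false) else st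
    if PySem.Chars.isalpha harf then
      let yeni := Char.ofNat (harf.toNat + 5)
      let yeni := if 'z' < yeni then Char.ofNat (yeni.toNat - 26) else yeni
      (st'.1 ++ [yeni], st'.2.1, st'.2.2)
    else
      (st'.1 ++ [harf], st'.2.1, st'.2.2)

def sifrele (normal_mesaj : String) : String :=
  let st := normal_mesaj.toList.foldl sifreleStep (([] : List Char), ([] : List Char), false)
  String.mk (if st.2.2 then st.1 ++ st.2.1.reverse else st.1)

-- ===== PORT B =====
-- B's per-character shift helper kaydir
def kaydir (c : Char) : Char :=
  if PySem.Chars.isalpha c then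
    let y := Char.ofNat (c.toNat + 5)
    if 'z' < y then Char.ofNat (y.toNat - 26) else y
  else c

-- B's outer while-loop over the remaining suffix; the inner j-scan over a digit run
-- is takeWhile (the slice s[i:j]) / dropWhile (advancing i to j)
def sifreleGo : List Char → List Char
  | [] => []
  | c :: r =>
    if PySem.Chars.isdigit c then
      ((c :: r).takeWhile PySem.Chars.isdigit).reverse
        ++ sifreleGo ((c :: r).dropWhile PySem.Chars.isdigit)
    else
      kaydir c :: sifreleGo r
termination_by l => l.length
decreasing_by
  · simp only [List.dropWhile_cons, *, if_true]
    exact Nat.lt_succ_of_le (List.length_dropWhile_le _ _)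
  · simp

def sifrele_alt (normal_mesaj : String) : String :=
  String.mk (sifreleGo normal_mesaj.toList)

-- ===== PRECONDITION & SPEC =====
def Spec_sifrele (normal_mesaj : String) (out : String) : Prop := out = sifrele_alt normal_mesaj
instance (normal_mesaj : String) (out : String) : Decidable (Spec_sifrele normal_mesaj out) := by unfold Spec_sifrele; infer_instance

-- ===== CLAIM (what is proved, stated in full; the proofs are below) =====
def Claim_equal_sifrele : Prop := ∀ (normal_mesaj : String), Dom_sifrele normal_mesaj → Spec_sifrele normal_mesaj (sifrele normal_mesaj)

-- ===== LEMMAS AND PROOFS =====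

-- A's loop followed by the final flush, started from an arbitrary state
def runA (st : List Char × List Char × Bool) (rest : List Char) : List Char :=
  let st' := rest.foldl sifreleStep st
  if st'.2.2 then st'.1 ++ st'.2.1.reverse else st'.1

lemma runA_true (rest : List Char) : ∀ acc buf,
    runA (acc, buf, true) rest
      = runA (acc ++ (buf ++ rest.takeWhile PySem.Chars.isdigit).reverse, [], false)
          (rest.dropWhile PySem.Chars.isdigit) := by
  induction rest with
  | nil => intro acc buf; simp [runA]
  | cons c r ih =>
    intro acc buf
    by_cases h : PySem.Chars.isdigit c = true
    · have := ih acc (buf ++ [c])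
      simp only [runA, List.foldl_cons, sifreleStep, h, if_true, List.takeWhile_cons,
        List.dropWhile_cons] at *
      simpa [List.append_assoc] using this
    · by_cases ha : PySem.Chars.isalpha c = true
      · simp [runA, List.foldl_cons, sifreleStep, h, ha]
      · simp [runA, List.foldl_cons, sifreleStep, h, ha]

lemma runA_main : ∀ n rest, rest.length ≤ n → ∀ acc : List Char,
    runA (acc, [], false) rest = acc ++ sifreleGo rest := by
  intro n
  induction n with
  | zero =>
    intro rest h acc
    have : rest = [] := List.eq_nil_of_length_eq_zero (Nat.le_zero.mp h)
    simp [this, runA, sifreleGo]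
  | succ n ih =>
    intro rest h acc
    match rest with
    | [] => simp [runA, sifreleGo]
    | c :: r =>
      by_cases hd : PySem.Chars.isdigit c = true
      · have step1 : runA (acc, [], false) (c :: r) = runA (acc, [c], true) r := by
          simp [runA, sifreleStep, hd]
        rw [step1, runA_true]
        have hlen : (r.dropWhile PySem.Chars.isdigit).length ≤ n := by
          have := List.length_dropWhile_le PySem.Chars.isdigit r
          simp at h; omega
        rw [ih _ hlen]
        rw [sifreleGo]
        simp [hd]
      · have hlen : r.length ≤ n := by simp at h; omega
        have step1 : runA (acc, [], false) (c :: r) = runA (acc ++ [kaydir c], [], false) r := by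
          by_cases ha : PySem.Chars.isalpha c = true
          · simp [runA, sifreleStep, kaydir, hd, ha]
          · simp [runA, sifreleStep, kaydir, hd, ha]
        rw [step1, ih _ hlen, sifreleGo]
        simp [hd]

-- ===== VERDICT (by name: the statement is the Claim_ definition above) =====
theorem sifrele_spec : Claim_equal_sifrele := by
  intro s _
  unfold Spec_sifrele sifrele sifrele_alt
  have := runA_main s.toList.length s.toList le_rfl []
  simp only [runA] at this
  simp [this]
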